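-- pv_equiv track=rewrite | github.com/JCMENDI/Proyecto-Final-Lenguajes-Formales-y-Aut-matas | Proyecto Final.py | validar_izquierda_derecha
-- ===== SOURCE A (Python) =====
-- def validar_izquierda_derecha(cadena):
--     try:
--         # 1. Debe comenzar con "abaab"
--         if not cadena.startswith("abaab"):
--             return False
--
--         # 2. Encontrar la posición del #
--         pos_hash = cadena.find('#')
--         if pos_hash == -1:
--             return False
--
--         # 3. Entre "abaab" y "#" solo puede haber asteriscos
--         seccion_media = cadena[5:pos_hash]
--         if not all(c == '*' for c in seccion_media):
--             return False
--
--         # 4. Después del # debe venir "ab"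
--         resto = cadena[pos_hash + 1:]
--         if not resto.startswith("ab"):
--             return False
--
--         # 5. Después de "ab" solo puede haber asteriscos
--         final = resto[2:]
--         if not all(c == '*' for c in final):
--             return False
--
--         return True
--     except:
--         return False
-- ===== SOURCE B (Python) =====
-- def validar_izquierda_derecha(cadena):
--     # single left-to-right DFA pass instead of startswith/find/slice passes
--     try:
--         estado = 0
--         for c in cadena:
--             if estado == 0 and c == 'a':
--                 estado = 1
--             elif estado == 1 and c == 'b':
--                 estado = 2
--             elif estado == 2 and c == 'a':
--                 estado = 3
--             elif estado == 3 and c == 'a':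
--                 estado = 4
--             elif estado == 4 and c == 'b':
--                 estado = 5
--             elif estado == 5 and c == '*':
--                 estado = 5
--             elif estado == 5 and c == '#':
--                 estado = 6
--             elif estado == 6 and c == 'a':
--                 estado = 7
--             elif estado == 7 and c == 'b':
--                 estado = 8
--             elif estado == 8 and c == '*':
--                 estado = 8
--             else:
--                 return False
--         return estado == 8
--     except TypeError:
--         return False
-- ===== Notes on version B (the rewrite author's own statement) =====
-- stated objective: alternative
-- what changed: Replaced A's multi-pass parsing (startswith, a hash search, two slices and two all() scans) by a single left-to-right DFA pass over the string with an explicit state variable.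
import Mathlib
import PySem

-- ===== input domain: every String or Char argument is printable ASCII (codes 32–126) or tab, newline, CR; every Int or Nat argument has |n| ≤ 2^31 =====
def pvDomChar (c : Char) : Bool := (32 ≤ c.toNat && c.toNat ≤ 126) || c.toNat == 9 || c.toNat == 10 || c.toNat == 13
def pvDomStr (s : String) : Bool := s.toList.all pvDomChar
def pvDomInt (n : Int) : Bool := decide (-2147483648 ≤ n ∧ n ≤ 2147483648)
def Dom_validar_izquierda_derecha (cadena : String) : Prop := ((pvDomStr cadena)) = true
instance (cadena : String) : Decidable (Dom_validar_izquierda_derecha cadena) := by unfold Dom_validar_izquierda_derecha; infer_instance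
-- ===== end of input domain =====

-- B replaces A's startswith/find/slice multi-pass parsing by one left-to-right DFA pass (objective: alternative; return value only).

-- ===== PORT A =====
def validar_izquierda_derecha (cadena : String) : Bool :=
  -- 1. Debe comenzar con "abaab"
  if !(PySem.Str.startswith cadena "abaab") then false
  else
    -- 2. Encontrar la posición del #
    let pos_hash := PySem.Str.find cadena "#"
    if pos_hash == -1 then false
    else
      -- 3. Entre "abaab" y "#" solo puede haber asteriscos
      let seccion_media := PySem.Str.slice cadena (some 5) (some pos_hash)
      if !(seccion_media.toList.all (fun c => c == '*')) then false
      else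
        -- 4. Después del # debe venir "ab"
        let resto := PySem.Str.slice cadena (some (pos_hash + 1)) none
        if !(PySem.Str.startswith resto "ab") then false
        else
          -- 5. Después de "ab" solo puede haber asteriscos
          let final := PySem.Str.slice resto (some 2) none
          if !(final.toList.all (fun c => c == '*')) then false
          else true

-- ===== PORT B =====
-- the DFA loop of Source B: state `s`, early `return False` on any unmatched character
def pvGo : Nat → List Char → Bool
  | s, [] => s == 8
  | s, c :: t =>
    if s == 0 && c == 'a' then pvGo 1 t
    else if s == 1 && c == 'b' then pvGo 2 t
    else if s == 2 && c == 'a' then pvGo 3 t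
    else if s == 3 && c == 'a' then pvGo 4 t
    else if s == 4 && c == 'b' then pvGo 5 t
    else if s == 5 && c == '*' then pvGo 5 t
    else if s == 5 && c == '#' then pvGo 6 t
    else if s == 6 && c == 'a' then pvGo 7 t
    else if s == 7 && c == 'b' then pvGo 8 t
    else if s == 8 && c == '*' then pvGo 8 t
    else false

def validar_izquierda_derecha_alt (cadena : String) : Bool := pvGo 0 cadena.toList

-- ===== PRECONDITION & SPEC =====
def Spec_validar_izquierda_derecha (cadena : String) (out : Bool) : Prop := out = validar_izquierda_derecha_alt cadena
instance (cadena : String) (out : Bool) : Decidable (Spec_validar_izquierda_derecha cadena out) := by unfold Spec_validar_izquierda_derecha; infer_instance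

-- ===== CLAIM (what is proved, stated in full; the proofs are below) =====
def Claim_equal_validar_izquierda_derecha : Prop := ∀ (cadena : String), Dom_validar_izquierda_derecha cadena → Spec_validar_izquierda_derecha cadena (validar_izquierda_derecha cadena)

-- ===== LEMMAS AND PROOFS =====

-- the language both programs recognise: "abaab", stars, '#', "ab", stars
def pvTail (r : List Char) : Prop :=
  ∃ m n : Nat, r = List.replicate m '*' ++ '#' :: 'a' :: 'b' :: List.replicate n '*'

def pvShape (l : List Char) : Prop :=
  ∃ r, l = 'a' :: 'b' :: 'a' :: 'a' :: 'b' :: r ∧ pvTail r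

lemma pvRepl_cons (c : Char) (t : List Char) :
    (∃ n, c :: t = List.replicate n '*') ↔ c = '*' ∧ ∃ n, t = List.replicate n '*' := by
  constructor
  · rintro ⟨n, h⟩
    cases n with
    | zero => simp at h
    | succ k => rw [List.replicate_succ] at h; injection h with h1 h2; exact ⟨h1, k, h2⟩
  · rintro ⟨rfl, n, rfl⟩; exact ⟨n + 1, rfl⟩

lemma pvGo8_iff (m : List Char) : pvGo 8 m = true ↔ ∃ n, m = List.replicate n '*' := by
  induction m with
  | nil => simp [pvGo]
  | cons c t ih => simp [pvGo, pvRepl_cons, ih]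


lemma pvGo6_iff (m : List Char) : pvGo 6 m = true ↔ ∃ n, m = 'a' :: 'b' :: List.replicate n '*' := by
  rcases m with _ | ⟨c, t⟩
  · simp [pvGo]
  by_cases hc : c = 'a'
  · subst hc
    rcases t with _ | ⟨d, u⟩
    · simp [pvGo]
    by_cases hd : d = 'b'
    · subst hd; simp [pvGo, pvGo8_iff]
    · simp [pvGo, hd]
  · simp [pvGo, hc]

lemma pvTail_cons (c : Char) (t : List Char) :
    pvTail (c :: t) ↔ (c = '*' ∧ pvTail t) ∨ (c = '#' ∧ ∃ n, t = 'a' :: 'b' :: List.replicate n '*') := by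
  constructor
  · rintro ⟨m, n, h⟩
    cases m with
    | zero => injection h with h1 h2; exact Or.inr ⟨h1, n, h2⟩
    | succ k => rw [List.replicate_succ] at h; injection h with h1 h2; exact Or.inl ⟨h1, k, n, h2⟩
  · rintro (⟨rfl, m, n, rfl⟩ | ⟨rfl, n, rfl⟩)
    · exact ⟨m + 1, n, rfl⟩
    · exact ⟨0, n, rfl⟩

lemma pvGo5_iff (m : List Char) : pvGo 5 m = true ↔ pvTail m := by
  induction m with
  | nil =>
    simp only [pvGo]
    constructor
    · intro h; simp at h
    · rintro ⟨m, n, h⟩; simp at h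
  | cons c t ih =>
    by_cases hc : c = '*'
    · subst hc; simp [pvGo, pvTail_cons, ih]
    by_cases hd : c = '#'
    · subst hd; simp [pvGo, pvTail_cons, pvGo6_iff]
    · simp [pvGo, pvTail_cons, hc, hd]

lemma pvB_iff (l : List Char) : pvGo 0 l = true ↔ pvShape l := by
  unfold pvShape
  rcases l with _ | ⟨c1, l⟩
  · simp [pvGo]
  by_cases h1 : c1 = 'a'
  case neg => simp [pvGo, h1]
  subst h1
  rcases l with _ | ⟨c2, l⟩
  · simp [pvGo]
  by_cases h2 : c2 = 'b'
  case neg => simp [pvGo, h2]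
  subst h2
  rcases l with _ | ⟨c3, l⟩
  · simp [pvGo]
  by_cases h3 : c3 = 'a'
  case neg => simp [pvGo, h3]
  subst h3
  rcases l with _ | ⟨c4, l⟩
  · simp [pvGo]
  by_cases h4 : c4 = 'a'
  case neg => simp [pvGo, h4]
  subst h4
  rcases l with _ | ⟨c5, l⟩
  · simp [pvGo]
  by_cases h5 : c5 = 'b'
  case neg => simp [pvGo, h5]
  subst h5
  simp [pvGo, pvGo5_iff]

lemma pvIfBool (x y : Bool) : (if (!x) = true then false else y) = (x && y) := by cases x <;> simp

lemma pvA_eval (s : String) :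
    validar_izquierda_derecha s =
      (PySem.Chars.startswith s.toList ['a','b','a','a','b'] &&
       (!(PySem.Chars.find s.toList ['#'] == -1) &&
        ((PySem.List.slice s.toList (some 5) (some (PySem.Chars.find s.toList ['#']))).all (fun c => c == '*') &&
         (PySem.Chars.startswith (PySem.List.slice s.toList (some (PySem.Chars.find s.toList ['#'] + 1)) none) ['a','b'] &&
          (PySem.List.slice (PySem.List.slice s.toList (some (PySem.Chars.find s.toList ['#'] + 1)) none) (some 2) none).all (fun c => c == '*'))))) := by
  unfold validar_izquierda_derecha
  simp only [pvIfBool, Bool.and_true]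
  simp [show "abaab".toList = ['a','b','a','a','b'] from rfl, show "ab".toList = ['a','b'] from rfl,
        show "#".toList = ['#'] from rfl]
  rfl

lemma pvSinglePrefixDrop (l : List Char) (j : Nat) (c : Char) : [c] <+: l.drop j ↔ l[j]? = some c := by
  rw [← List.head?_drop]
  rcases l.drop j with _ | ⟨d, u⟩
  · simp
  · simp [List.cons_prefix_cons, eq_comm]

lemma pvA_iff (s : String) : validar_izquierda_derecha s = true ↔ pvShape s.toList := by
  rw [pvA_eval]
  by_cases h1 : PySem.Chars.startswith s.toList ['a','b','a','a','b'] = true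
  case neg =>
    simp only [Bool.and_eq_true]
    constructor
    · rintro ⟨h, -⟩; exact absurd h h1
    · rintro ⟨r, hr, -⟩
      exact absurd ((PySem.Chars.startswith_iff _ _).mpr ⟨r, by rw [hr]; rfl⟩) h1
  obtain ⟨r, hr⟩ := (PySem.Chars.startswith_iff s.toList _).mp h1
  have hshape : pvShape s.toList ↔ pvTail r := by
    constructor
    · rintro ⟨r', hr', ht⟩
      rw [← hr] at hr'
      simp only [List.cons_append, List.nil_append, List.cons.injEq, true_and] at hr'
      rwa [hr']
    · intro ht; exact ⟨r, by rw [← hr]; rfl, ht⟩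
  rw [hshape]
  by_cases h2 : PySem.Chars.find s.toList ['#'] = -1
  case pos =>
    simp only [h2, Bool.and_eq_true]
    simp only [show ((-1 : Int) == -1) = true from rfl, Bool.not_true]
    constructor
    · rintro ⟨-, h, -⟩; simp at h
    · rintro ⟨m, n, hrr⟩
      exfalso
      apply (PySem.Chars.find_ne_neg_one_iff s.toList ['#']).mpr _ h2
      exact ⟨['a','b','a','a','b'] ++ List.replicate m '*', 'a' :: 'b' :: List.replicate n '*',
        by rw [← hr, hrr]; simp⟩
  -- find succeeded
  have h0 : 0 ≤ PySem.Chars.find s.toList ['#'] := by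
    have := PySem.Chars.neg_one_le_find s.toList ['#']
    omega
  obtain ⟨hpre, hmin⟩ := PySem.Chars.find_spec (s := s.toList) (sub := ['#']) h0
  rw [pvSinglePrefixDrop] at hpre
  obtain ⟨q, hpq⟩ : ∃ q : Nat, PySem.Chars.find s.toList ['#'] = (q : Int) :=
    ⟨(PySem.Chars.find s.toList ['#']).toNat, by omega⟩
  rw [hpq] at hpre
  simp only [Int.toNat_natCast] at hpre
  have hminN : ∀ i < q, s.toList[i]? ≠ some '#' := by
    intro i hi hc
    exact hmin i (by omega) ((pvSinglePrefixDrop _ _ _).mpr hc)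
  have hq5 : 5 ≤ q := by
    by_contra hlt
    rw [Nat.not_le] at hlt
    rw [← hr, List.getElem?_append_left (by simpa using hlt)] at hpre
    have := List.mem_of_getElem? hpre
    simp at this
  have hqr : r[q - 5]? = some '#' := by
    rw [← hr, List.getElem?_append_right (by simpa using hq5)] at hpre
    simpa using hpre
  have hminr : ∀ i < q - 5, r[i]? ≠ some '#' := by
    intro i hi hc
    apply hminN (5 + i) (by omega)
    rw [← hr, List.getElem?_append_right (by simp)]
    simpa using hc
  have hjlen : q - 5 < r.length := by
    obtain ⟨h, -⟩ := List.getElem?_eq_some_iff.mp hqr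
    exact h
  have hdrop5 : s.toList.drop 5 = r := by rw [← hr]; rfl
  have hmid : PySem.List.slice s.toList (some 5) (some (PySem.Chars.find s.toList ['#'])) = r.take (q - 5) := by
    rw [PySem.List.slice_toNat s.toList (by norm_num) h0, hpq]
    simp only [Int.toNat_natCast, show (5 : Int).toNat = 5 from rfl, hdrop5]
  have hresto : PySem.List.slice s.toList (some (PySem.Chars.find s.toList ['#'] + 1)) none = r.drop (q - 5 + 1) := by
    rw [PySem.List.slice_from s.toList (by omega), hpq]
    have h1' : ((q : Int) + 1).toNat = 5 + (q - 5 + 1) := by omega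
    rw [h1', ← hr]
    rw [List.drop_append]
    simp [show 5 + (q - 5 + 1) - 5 = q - 5 + 1 from by omega]
  have hfinal : ∀ t : List Char, PySem.List.slice t (some 2) none = t.drop 2 := by
    intro t; rw [PySem.List.slice_from t (by norm_num)]; rfl
  simp only [h1, hmid, hresto, hfinal, Bool.and_eq_true, Bool.not_eq_true', beq_eq_false_iff_ne,
    ne_eq, true_and, List.all_eq_true, beq_iff_eq]
  constructor
  · rintro ⟨-, hm, hsw, hf⟩
    obtain ⟨u, hu⟩ := (PySem.Chars.startswith_iff _ _).mp hsw
    have htake : r.take (q - 5) = List.replicate (q - 5) '*' := by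
      rw [List.eq_replicate_iff]
      exact ⟨by rw [List.length_take]; omega, hm⟩
    have hdropu : (r.drop (q - 5 + 1)).drop 2 = u := by rw [← hu]; rfl
    have hurep : u = List.replicate u.length '*' := by
      rw [List.eq_replicate_iff]
      exact ⟨rfl, by intro b hb; exact hf b (by rw [hdropu]; exact hb)⟩
    refine ⟨q - 5, u.length, ?_⟩
    have hrq : r[q - 5] = '#' := by
      obtain ⟨h, he⟩ := List.getElem?_eq_some_iff.mp hqr
      exact he
    calc r = r.take (q - 5) ++ r.drop (q - 5) := (List.take_append_drop _ r).symm
      _ = List.replicate (q - 5) '*' ++ ('#' :: r.drop (q - 5 + 1)) := by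
            rw [htake, List.drop_eq_getElem_cons hjlen, hrq]
      _ = List.replicate (q - 5) '*' ++ ('#' :: 'a' :: 'b' :: List.replicate u.length '*') := by
            rw [← hu, ← hurep]; rfl
  · rintro ⟨m, n, hrr⟩
    have hhash : r[m]? = some '#' := by
      rw [hrr, List.getElem?_append_right (by simp)]
      simp
    have hstar : ∀ i < m, r[i]? = some '*' := by
      intro i hi
      rw [hrr, List.getElem?_append_left (by simpa using hi)]
      simp [hi]
    have hjm : q - 5 = m := by
      rcases Nat.lt_trichotomy (q - 5) m with h | h | h
      · have := hstar _ h; rw [hqr] at this; simp at this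
      · exact h
      · exact absurd hhash (hminr m h)
    rw [hjm, hrr]
    have htake : (List.replicate m '*' ++ '#' :: 'a' :: 'b' :: List.replicate n '*').take m
        = List.replicate m '*' := List.take_left' (by simp)
    have hdrop : (List.replicate m '*' ++ '#' :: 'a' :: 'b' :: List.replicate n '*').drop (m + 1)
        = 'a' :: 'b' :: List.replicate n '*' := by
      rw [List.drop_append]
      simp
    refine ⟨?_, ?_, ?_, ?_⟩
    · omega
    · intro b hb; rw [htake] at hb; exact (List.eq_of_mem_replicate hb)
    · rw [hdrop]; exact (PySem.Chars.startswith_iff _ _).mpr ⟨List.replicate n '*', rfl⟩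
    · intro b hb; rw [hdrop] at hb; exact List.eq_of_mem_replicate (by simpa using hb)

-- ===== VERDICT (by name: the statement is the Claim_ definition above) =====
theorem validar_izquierda_derecha_spec : Claim_equal_validar_izquierda_derecha := by
  intro s _
  unfold Spec_validar_izquierda_derecha validar_izquierda_derecha_alt
  rw [Bool.eq_iff_iff, pvA_iff, pvB_iff]
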